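-- pv_equiv track=rewrite | github.com/DenBugNBA/YandexAlgorithmsTrainings | 5. Prefix sums and two pointers (1.0)/C_Tourism.py | count_prefix_sum
-- ===== SOURCE A (Python) =====
-- def count_prefix_sum(coords, direction):
--     if direction == -1:
--         coords = coords[::-1]
--
--     prefix_sum_lifts = [0] * len(coords)
--
--     prev_y = coords[0][1]
--
--     for i in range(1, len(coords)):
--         current_y = coords[i][1]
--
--         if current_y > prev_y:
--             prefix_sum_lifts[i] = prefix_sum_lifts[i - 1] + (current_y - prev_y)
--         else:
--             prefix_sum_lifts[i] = prefix_sum_lifts[i - 1]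
--
--         prev_y = current_y
--         i += 1
--
--     return prefix_sum_lifts
-- ===== SOURCE B (Python) =====
-- def count_prefix_sum(coords, direction):
--     if direction == -1:
--         coords = coords[::-1]
--     ys = [y for _, y in coords]
--     base = ys[0]
--     out = []
--     tv = 0          # total variation sum |y_i - y_{i-1}| so far
--     prev = base
--     for y in ys:
--         tv += abs(y - prev)
--         # sum of upward steps = (net rise + total variation) / 2
--         out.append((y - base + tv) // 2)
--         prev = y
--     return out
-- ===== Notes on version B (the rewrite author's own statement) =====
-- stated objective: alternative
-- what changed: B never accumulates clamped diffs: it maintains the running total variation sum|y_i - y_{i-1}| and obtains each output in closed form as ((y_i - y_0) + total_variation)//2, using the identity max(0,d) = (d+|d|)/2 and telescoping of the raw differences.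
import Mathlib
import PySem

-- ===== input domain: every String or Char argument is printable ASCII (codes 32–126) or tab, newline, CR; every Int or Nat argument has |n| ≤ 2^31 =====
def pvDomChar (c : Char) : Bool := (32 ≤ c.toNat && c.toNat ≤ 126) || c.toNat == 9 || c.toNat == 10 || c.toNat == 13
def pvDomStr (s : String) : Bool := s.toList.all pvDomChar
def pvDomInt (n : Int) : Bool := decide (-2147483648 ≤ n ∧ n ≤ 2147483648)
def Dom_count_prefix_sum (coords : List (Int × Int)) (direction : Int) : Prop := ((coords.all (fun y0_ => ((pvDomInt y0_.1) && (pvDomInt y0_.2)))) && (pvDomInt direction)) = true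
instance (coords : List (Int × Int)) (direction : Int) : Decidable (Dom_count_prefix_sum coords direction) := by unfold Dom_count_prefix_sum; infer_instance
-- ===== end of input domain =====

-- B replaces A's accumulation of clamped upward diffs by a closed-form per element:
-- it tracks the running total variation and outputs ((y_i - y_0) + total_variation) // 2,
-- using max(0,d) = (d+|d|)/2 and telescoping; same O(n) cost (objective: alternative).

-- ===== PORT A =====
def count_prefix_sum (coords : List (Int × Int)) (direction : Int) : List Int :=
  let cs := if direction = -1 then (PySem.List.slice? coords none none (-1)).getD [] else coords
  match cs with
  | [] => []   -- Python raises IndexError at coords[0] here; excluded by Pre_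
  | c0 :: _ =>
    ((PySem.List.pyRange 1 (cs.length : Int) 1).foldl
      (fun (st : List Int × Int) i =>
        let lifts := st.1
        let prev_y := st.2
        let current_y := (PySem.List.pyGetD cs i (0, 0)).2
        let lifts :=
          if current_y > prev_y then
            lifts.set i.toNat (PySem.List.pyGetD lifts (i - 1) 0 + (current_y - prev_y))
          else
            lifts.set i.toNat (PySem.List.pyGetD lifts (i - 1) 0)
        (lifts, current_y))
      (List.replicate cs.length 0, c0.2)).1

-- ===== PORT B =====
def count_prefix_sum_alt (coords : List (Int × Int)) (direction : Int) : List Int :=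
  let cs := if direction = -1 then coords.reverse else coords
  let ys := cs.map (fun p => p.2)
  match ys with
  | [] => []   -- Python raises IndexError at ys[0] here (like A); excluded by Pre_
  | base :: _ =>
    (ys.foldl
      (fun (st : List Int × Int × Int) y =>
        let out := st.1
        let tv := st.2.1 + |y - st.2.2|
        (out ++ [PySem.Int.floordiv (y - base + tv) 2], tv, y))
      ([], 0, base)).1

-- ===== PRECONDITION & SPEC =====
-- Pre_ excludes only the empty list, on which Python A raises IndexError at coords[0].
def Pre_count_prefix_sum (coords : List (Int × Int)) (direction : Int) : Prop := coords ≠ []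
instance (coords : List (Int × Int)) (direction : Int) : Decidable (Pre_count_prefix_sum coords direction) := by unfold Pre_count_prefix_sum; infer_instance

def pvWitness_count_prefix_sum : (List (Int × Int)) × Int := ([(0, 1), (1, 3), (2, 2)], 1)

def Spec_count_prefix_sum (coords : List (Int × Int)) (direction : Int) (out : List Int) : Prop := out = count_prefix_sum_alt coords direction
instance (coords : List (Int × Int)) (direction : Int) (out : List Int) : Decidable (Spec_count_prefix_sum coords direction out) := by unfold Spec_count_prefix_sum; infer_instance

-- ===== CLAIM =====
def Claim_equal_count_prefix_sum : Prop := ∀ (coords : List (Int × Int)) (direction : Int), Dom_count_prefix_sum coords direction → Pre_count_prefix_sum coords direction → Spec_count_prefix_sum coords direction (count_prefix_sum coords direction)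

-- ===== LEMMAS AND PROOFS =====

-- reference: running prefix sums of clamped upward y-steps
def pvRef (a y : Int) : List (Int × Int) → List Int
  | [] => []
  | c :: cs => (a + max 0 (c.2 - y)) :: pvRef (a + max 0 (c.2 - y)) c.2 cs

theorem pvRef_length (l : List (Int × Int)) : ∀ a y, (pvRef a y l).length = l.length := by
  induction l with
  | nil => intro a y; rfl
  | cons c cs ih => intro a y; simp [pvRef, ih]

theorem pvRef_snoc (l : List (Int × Int)) : ∀ (a y : Int) (c : Int × Int),
    pvRef a y (l ++ [c]) =
      pvRef a y l ++ [(a :: pvRef a y l).getLastD 0 + max 0 (c.2 - (l.map Prod.snd).getLastD y)] := by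
  induction l with
  | nil => intro a y c; simp [pvRef]
  | cons p l ih =>
    intro a y c
    simp only [List.cons_append, pvRef, ih, List.map_cons, List.getLastD_cons]

theorem pvGetD_last (R : List Int) : ∀ a : Int, (a :: R).getD R.length 0 = (a :: R).getLastD 0 := by
  induction R with
  | nil => intro a; rfl
  | cons b R ih =>
    intro a
    simpa [List.getD_cons_succ, List.getLastD_cons] using ih b

-- invariant of A's loop
theorem a_loop_inv (c0 : Int × Int) (rest : List (Int × Int)) (j : ℕ) (hj : j ≤ rest.length) :
    ((PySem.List.pyRange 1 (1 + (j : Int)) 1).foldl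
      (fun (st : List Int × Int) i =>
        let lifts := st.1
        let prev_y := st.2
        let current_y := (PySem.List.pyGetD (c0 :: rest) i (0, 0)).2
        let lifts :=
          if current_y > prev_y then
            lifts.set i.toNat (PySem.List.pyGetD lifts (i - 1) 0 + (current_y - prev_y))
          else
            lifts.set i.toNat (PySem.List.pyGetD lifts (i - 1) 0)
        (lifts, current_y))
      (List.replicate (rest.length + 1) 0, c0.2))
    = ((0 :: pvRef 0 c0.2 (rest.take j)) ++ List.replicate (rest.length - j) 0,
        ((rest.take j).map Prod.snd).getLastD c0.2) := by
  induction j with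
  | zero =>
    rw [show (1 + ((0:ℕ) : Int)) = 1 by norm_num, PySem.List.pyRange_one_eq_nil (le_refl _)]
    simp [pvRef, List.replicate_succ]
  | succ j ih =>
    have hj' : j ≤ rest.length := Nat.le_of_succ_le hj
    have hjlt : j < rest.length := hj
    rw [show (1 + ((j + 1 : ℕ) : Int)) = (1 + (j : Int)) + 1 by push_cast; ring,
        PySem.List.pyRange_one_succ_right (by omega), List.foldl_append, ih hj']
    -- the last step, i = 1 + j
    obtain ⟨c, hc⟩ : ∃ c, rest[j]? = some c := ⟨rest[j], List.getElem?_eq_getElem hjlt⟩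
    have htake : rest.take (j + 1) = rest.take j ++ [c] := by
      rw [List.take_succ, hc]; rfl
    simp only [List.foldl_cons, List.foldl_nil]
    have hcur : (PySem.List.pyGetD (c0 :: rest) (1 + (j : Int)) (0, 0)) = c := by
      rw [show (1 + (j : Int)) = ((j + 1 : ℕ) : Int) by push_cast; ring,
          PySem.List.pyGetD_natCast]
      simp [List.getD, hc]
    have hlenP : (0 :: pvRef 0 c0.2 (rest.take j)).length = j + 1 := by
      simp [pvRef_length, List.length_take, Nat.min_eq_left hj']
    have htoNat : (1 + (j : Int)).toNat = j + 1 := by omega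
    have hsub : (1 + (j : Int)) - 1 = ((j : ℕ) : Int) := by ring
    have hold : PySem.List.pyGetD ((0 :: pvRef 0 c0.2 (rest.take j)) ++ List.replicate (rest.length - j) 0) ((1 + (j : Int)) - 1) 0
        = (0 :: pvRef 0 c0.2 (rest.take j)).getLastD 0 := by
      rw [hsub, PySem.List.pyGetD_natCast]
      have : ((0 :: pvRef 0 c0.2 (rest.take j)) ++ List.replicate (rest.length - j) 0).getD j 0
          = (0 :: pvRef 0 c0.2 (rest.take j)).getD j 0 := by
        simp only [List.getD]
        rw [List.getElem?_append_left (by omega)]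
      rw [this]
      have hlen2 : (pvRef 0 c0.2 (rest.take j)).length = j := by
        simp [pvRef_length, List.length_take, Nat.min_eq_left hj']
      have h2 := pvGetD_last (pvRef 0 c0.2 (rest.take j)) 0
      rw [hlen2] at h2
      exact h2
    have hset : ∀ v : Int,
        ((0 :: pvRef 0 c0.2 (rest.take j)) ++ List.replicate (rest.length - j) 0).set ((1 + (j : Int)).toNat) v
        = (0 :: pvRef 0 c0.2 (rest.take j)) ++ v :: List.replicate (rest.length - (j + 1)) 0 := by
      intro v
      rw [htoNat, List.set_append_right _ _ (by omega)]
      have hrep : List.replicate (rest.length - j) (0 : Int) = 0 :: List.replicate (rest.length - (j + 1)) 0 := by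
        rw [show rest.length - j = (rest.length - (j + 1)) + 1 by omega, List.replicate_succ]
      rw [hrep]
      congr 1
      simp [hlenP]
    have hbranch : ∀ (prev old : Int),
        (if c.2 > prev then
          ((0 :: pvRef 0 c0.2 (rest.take j)) ++ List.replicate (rest.length - j) 0).set ((1 + (j : Int)).toNat) (old + (c.2 - prev))
        else
          ((0 :: pvRef 0 c0.2 (rest.take j)) ++ List.replicate (rest.length - j) 0).set ((1 + (j : Int)).toNat) old)
        = (0 :: pvRef 0 c0.2 (rest.take j)) ++ (old + max 0 (c.2 - prev)) :: List.replicate (rest.length - (j + 1)) 0 := by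
      intro prev old
      by_cases h : c.2 > prev
      · rw [if_pos h, hset]
        congr 3
        omega
      · rw [if_neg h, hset]
        congr 3
        omega
    simp only [hcur, hold, hbranch]
    rw [htake, pvRef_snoc]
    simp [List.append_assoc]

-- A's core equals the reference
theorem a_core_eq (c0 : Int × Int) (rest : List (Int × Int)) :
    count_prefix_sum (c0 :: rest) 0 = 0 :: pvRef 0 c0.2 rest := by
  have h := a_loop_inv c0 rest rest.length (le_refl _)
  unfold count_prefix_sum
  simp only [if_neg (by decide : ¬ (0 : Int) = -1)]
  rw [show ((c0 :: rest).length : Int) = 1 + (rest.length : Int) by simp; ring]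
  rw [show (c0 :: rest).length = rest.length + 1 from by simp]
  rw [h]
  simp

-- B's produced tail values, as a recursion over the remaining pairs
def pvB (tv prev base : Int) : List (Int × Int) → List Int
  | [] => []
  | c :: cs =>
      PySem.Int.floordiv (c.2 - base + (tv + |c.2 - prev|)) 2 :: pvB (tv + |c.2 - prev|) c.2 base cs

-- B's fold appends pvB to the accumulated output
theorem b_fold (rest : List (Int × Int)) : ∀ (out : List Int) (tv prev base : Int),
    ((rest.map (fun p => p.2)).foldl
      (fun (st : List Int × Int × Int) y =>
        let out := st.1
        let tv := st.2.1 + |y - st.2.2|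
        (out ++ [PySem.Int.floordiv (y - base + tv) 2], tv, y))
      (out, tv, prev)).1 = out ++ pvB tv prev base rest := by
  induction rest with
  | nil => intro out tv prev base; simp [pvB]
  | cons c cs ih =>
    intro out tv prev base
    simp only [List.map_cons, List.foldl_cons]
    rw [ih]
    simp [pvB]

-- closed form equals running clamped sums: max(0,d) = (d+|d|)/2 with telescoping
theorem pvB_eq_pvRef (rest : List (Int × Int)) : ∀ (tv prev base a : Int),
    2 * a = prev - base + tv → pvB tv prev base rest = pvRef a prev rest := by
  induction rest with
  | nil => intro tv prev base a _; rfl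
  | cons c cs ih =>
    intro tv prev base a hinv
    have hnum : c.2 - base + (tv + |c.2 - prev|) = 2 * (a + max 0 (c.2 - prev)) := by
      rcases abs_cases (c.2 - prev) with ⟨h1, h2⟩ | ⟨h1, h2⟩ <;> omega
    have hdiv : PySem.Int.floordiv (c.2 - base + (tv + |c.2 - prev|)) 2
        = a + max 0 (c.2 - prev) := by
      rw [hnum, PySem.Int.floordiv_eq_ediv_of_pos (by omega)]
      omega
    simp only [pvB, pvRef, hdiv]
    rw [ih (tv + |c.2 - prev|) c.2 base (a + max 0 (c.2 - prev))
      (by rcases abs_cases (c.2 - prev) with ⟨h1, h2⟩ | ⟨h1, h2⟩ <;> omega)]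

theorem b_core_eq (c0 : Int × Int) (rest : List (Int × Int)) :
    count_prefix_sum_alt (c0 :: rest) 0 = 0 :: pvRef 0 c0.2 rest := by
  unfold count_prefix_sum_alt
  simp only [if_neg (by decide : ¬ (0 : Int) = -1), List.map_cons, List.foldl_cons]
  rw [show ∀ st, (List.foldl _ st _) = (List.foldl
      (fun (st : List Int × Int × Int) y =>
        let out := st.1
        let tv := st.2.1 + |y - st.2.2|
        (out ++ [PySem.Int.floordiv (y - c0.2 + tv) 2], tv, y)) st (rest.map (fun p => p.2)))
    from fun _ => rfl]
  rw [b_fold]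
  have h0 : PySem.Int.floordiv (c0.2 - c0.2 + (0 + |c0.2 - c0.2|)) 2 = 0 := by
    simp [PySem.Int.floordiv_eq_ediv_of_pos]
  simp only [h0]
  rw [pvB_eq_pvRef rest (0 + |c0.2 - c0.2|) c0.2 c0.2 0 (by simp)]
  simp

-- both ports ignore direction once the reversal is resolved to the same list
theorem a_eval (coords : List (Int × Int)) (direction : Int) :
    count_prefix_sum coords direction
      = count_prefix_sum (if direction = -1 then coords.reverse else coords) 0 := by
  unfold count_prefix_sum
  by_cases h : direction = -1
  · simp [h, PySem.List.slice?_none_none_neg_one]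
  · simp [h]

theorem b_eval (coords : List (Int × Int)) (direction : Int) :
    count_prefix_sum_alt coords direction
      = count_prefix_sum_alt (if direction = -1 then coords.reverse else coords) 0 := by
  unfold count_prefix_sum_alt
  by_cases h : direction = -1
  · simp [h]
  · simp [h]

-- ===== VERDICT =====
theorem count_prefix_sum_spec : Claim_equal_count_prefix_sum := by
  intro coords direction _ hpre
  unfold Spec_count_prefix_sum
  rw [a_eval, b_eval]
  cases hcs : (if direction = -1 then coords.reverse else coords) with
  | nil =>
    exfalso
    apply hpre
    by_cases h : direction = -1 <;> simp [h] at hcs <;> simp [hcs]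
  | cons c0 rest => rw [a_core_eq, b_core_eq]
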